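-- pv_equiv track=rewrite | github.com/Skizzzz/NOC_Toolkit | noc-toolkit-prod/tools/phrase_search.py | build_cli_for_action
-- ===== SOURCE A (Python) =====
-- def _split_nonempty_lines(text):
--     lines = []
--     for raw in (text or "").splitlines():
--         s = raw.strip()
--         if s:
--             lines.append(s)
--     return lines
--
-- def build_cli_for_action(pairs, action, new_description=None, custom_config=None):
--     """
--     Build per-host CLI lists.
--       pairs: [(host, interface), ...]
--       action: "set-description" | "custom-config"
--       new_description: str when action == "set-description"
--       custom_config: multiline str when action == "custom-config"
--
--     Returns dict: { host: [ "interface Gi1/0/1", "description blah", "exit", ... ] }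
--     """
--     # Group interfaces per host
--     per_host = {}
--     for host, iface in pairs or []:
--         if host and iface:
--             per_host.setdefault(host, []).append(iface)
--
--     cli_map = {}
--     if action == "set-description":
--         if not (new_description and new_description.strip()):
--             # No description provided -> nothing to do
--             return {h: [] for h in per_host.keys()}
--         desc = new_description.strip()
--         for host, ifaces in per_host.items():
--             lines = []
--             for iface in sorted(set(ifaces)):
--                 lines.append(f"interface {iface}")
--                 lines.append(f"description {desc}")
--                 lines.append("exit")
--             cli_map[host] = lines
--
--     elif action == "custom-config":
--         cfg_lines = _split_nonempty_lines(custom_config or "")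
--         if not cfg_lines:
--             return {h: [] for h in per_host.keys()}
--         for host, ifaces in per_host.items():
--             lines = []
--             for iface in sorted(set(ifaces)):
--                 lines.append(f"interface {iface}")
--                 for ln in cfg_lines:
--                     # Replace token with the interface name when present
--                     lines.append(ln.replace("{INTERFACE}", iface))
--                 lines.append("exit")
--             cli_map[host] = lines
--
--     else:
--         # Unknown action -> empty plan
--         cli_map = {h: [] for h in per_host.keys()}
--
--     return cli_map
-- ===== SOURCE B (Python) =====
-- def build_cli_for_action(pairs, action, new_description=None, custom_config=None):
--     good = [(h, i) for h, i in (pairs or []) if h and i]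
--     hosts = list(dict.fromkeys(h for h, _ in good))
--
--     # choose the per-interface body once, uniformly for both actions
--     if action == "set-description":
--         desc = (new_description or "").strip()
--         body = (lambda iface: ["description " + desc]) if desc else None
--     elif action == "custom-config":
--         cfg = [s for s in map(str.strip, (custom_config or "").splitlines()) if s]
--         body = (lambda iface: [ln.replace("{INTERFACE}", iface) for ln in cfg]) if cfg else None
--     else:
--         body = None
--
--     if body is None:
--         return {h: [] for h in hosts}
--     return {
--         h: [line
--             for iface in sorted({i for hh, i in good if hh == h})
--             for line in ["interface " + iface] + body(iface) + ["exit"]]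
--         for h in hosts
--     }
-- ===== Notes on version B (the rewrite author's own statement) =====
-- stated objective: idiomatic
-- what changed: Replaces A's on-the-fly dict-setdefault grouping and three separately-written rendering loops by a filter of the pairs, a dict.fromkeys first-seen host index, one uniformly chosen per-interface body function, and a single dict-comprehension render pass that gathers each host's interfaces by a direct filter over the pairs.
import Mathlib
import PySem

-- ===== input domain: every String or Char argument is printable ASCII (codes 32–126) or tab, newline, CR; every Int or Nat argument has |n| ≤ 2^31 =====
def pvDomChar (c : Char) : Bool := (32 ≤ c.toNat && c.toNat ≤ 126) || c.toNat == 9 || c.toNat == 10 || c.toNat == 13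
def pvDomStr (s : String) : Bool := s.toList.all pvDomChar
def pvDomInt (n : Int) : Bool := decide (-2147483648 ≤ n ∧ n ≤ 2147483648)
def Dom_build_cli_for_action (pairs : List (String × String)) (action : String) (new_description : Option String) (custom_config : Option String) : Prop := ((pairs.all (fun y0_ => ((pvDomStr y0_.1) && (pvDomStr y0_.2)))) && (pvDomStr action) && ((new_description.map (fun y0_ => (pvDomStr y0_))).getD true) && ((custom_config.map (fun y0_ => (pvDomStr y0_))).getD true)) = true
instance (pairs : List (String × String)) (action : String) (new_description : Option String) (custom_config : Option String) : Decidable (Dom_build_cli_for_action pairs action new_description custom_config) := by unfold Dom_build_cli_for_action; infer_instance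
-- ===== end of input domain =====

-- B replaces A's setdefault grouping and three separate rendering loops by a filtered pair list, a
-- first-seen host index (dict.fromkeys), one uniformly chosen per-interface body function and a single
-- comprehension render pass (objective: more idiomatic; not claimed faster).

-- ===== PORT A =====
def pvSplitNonemptyLines (text : String) : List String :=
  (PySem.Str.splitlines text).foldl (fun lines raw =>
    let s := PySem.Str.strip raw
    if s ≠ "" then lines ++ [s] else lines) []

def build_cli_for_action (pairs : List (String × String)) (action : String) (new_description : Option String) (custom_config : Option String) : List (String × List String) :=
  -- per_host = {}; for host, iface in pairs: if host and iface: per_host.setdefault(host, []).append(iface)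
  let per_host : PySem.Dict String (List String) :=
    pairs.foldl (fun d p => if p.1 ≠ "" ∧ p.2 ≠ "" then d.modify p.1 [] (· ++ [p.2]) else d) PySem.Dict.empty
  if action = "set-description" then
    -- truthiness of `new_description and new_description.strip()`
    let ok : Bool := match new_description with
      | none => false
      | some s => decide (s ≠ "") && decide (PySem.Str.strip s ≠ "")
    if !ok then
      per_host.keys.map (fun h => (h, ([] : List String)))
    else
      let desc := PySem.Str.strip (new_description.getD "")
      let cli_map := per_host.items.foldl (fun (cm : PySem.Dict String (List String)) hi =>
        let lines := (PySem.List.sorted (PySem.Set.ofList hi.2) (fun x => x) false).foldl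
          (fun lines iface => lines ++ ["interface " ++ iface] ++ ["description " ++ desc] ++ ["exit"]) []
        cm.insert hi.1 lines) PySem.Dict.empty
      cli_map.items
  else if action = "custom-config" then
    let cfg_lines := pvSplitNonemptyLines (custom_config.getD "")
    if cfg_lines = [] then
      per_host.keys.map (fun h => (h, ([] : List String)))
    else
      let cli_map := per_host.items.foldl (fun (cm : PySem.Dict String (List String)) hi =>
        let lines := (PySem.List.sorted (PySem.Set.ofList hi.2) (fun x => x) false).foldl
          (fun lines iface =>
            let lines := lines ++ ["interface " ++ iface]
            let lines := cfg_lines.foldl (fun lines ln => lines ++ [PySem.Str.replace ln "{INTERFACE}" iface]) lines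
            lines ++ ["exit"]) []
        cm.insert hi.1 lines) PySem.Dict.empty
      cli_map.items
  else
    per_host.keys.map (fun h => (h, ([] : List String)))

-- ===== PORT B =====
def build_cli_for_action_alt (pairs : List (String × String)) (action : String) (new_description : Option String) (custom_config : Option String) : List (String × List String) :=
  let good := pairs.filter (fun p => decide (p.1 ≠ "" ∧ p.2 ≠ ""))
  let hosts := PySem.List.dedup (good.map (·.1))
  let body? : Option (String → List String) :=
    if action = "set-description" then
      let desc := PySem.Str.strip (new_description.getD "")
      if desc ≠ "" then some (fun _iface => ["description " ++ desc]) else none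
    else if action = "custom-config" then
      let cfg := ((PySem.Str.splitlines (custom_config.getD "")).map PySem.Str.strip).filter (fun s => decide (s ≠ ""))
      if cfg ≠ [] then some (fun iface => cfg.map (fun ln => PySem.Str.replace ln "{INTERFACE}" iface)) else none
    else none
  match body? with
  | none => hosts.map (fun h => (h, ([] : List String)))
  | some body =>
    hosts.map (fun h =>
      (h, (PySem.List.sorted (PySem.Set.ofList ((good.filter (fun p => p.1 == h)).map (·.2))) (fun x => x) false).flatMap
            (fun iface => ["interface " ++ iface] ++ body iface ++ ["exit"])))

-- ===== PRECONDITION & SPEC =====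
def Spec_build_cli_for_action (pairs : List (String × String)) (action : String) (new_description : Option String) (custom_config : Option String) (out : List (String × List String)) : Prop := out = build_cli_for_action_alt pairs action new_description custom_config
instance (pairs : List (String × String)) (action : String) (new_description : Option String) (custom_config : Option String) (out : List (String × List String)) : Decidable (Spec_build_cli_for_action pairs action new_description custom_config out) := by unfold Spec_build_cli_for_action; infer_instance

-- ===== CLAIM (what is proved, stated in full; the proofs are below) =====
def Claim_equal_build_cli_for_action : Prop := ∀ (pairs : List (String × String)) (action : String) (new_description : Option String) (custom_config : Option String), Dom_build_cli_for_action pairs action new_description custom_config → Spec_build_cli_for_action pairs action new_description custom_config (build_cli_for_action pairs action new_description custom_config)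

-- ===== LEMMAS AND PROOFS =====

-- A's setdefault/append grouping loop, read off as items: first-seen hosts each paired with its ifaces
theorem pv_keys_group (good : List (String × String)) :
    ((good.foldl (fun (d : PySem.Dict String (List String)) p => d.modify p.1 [] (· ++ [p.2])) PySem.Dict.empty).keys)
      = PySem.List.dedup (good.map (·.1)) := by
  rw [PySem.Dict.keys_foldl_modify_key (key := Prod.fst)]
  simp [PySem.Set.update_nil_left]

theorem pv_items_group (good : List (String × String)) :
    ((good.foldl (fun (d : PySem.Dict String (List String)) p => d.modify p.1 [] (· ++ [p.2])) PySem.Dict.empty).items)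
      = (PySem.List.dedup (good.map (·.1))).map (fun h => (h, (good.filter (fun p => p.1 == h)).map (·.2))) := by
  have hnd : ((good.foldl (fun (d : PySem.Dict String (List String)) p => d.modify p.1 [] (· ++ [p.2])) PySem.Dict.empty).keys).Nodup :=
    PySem.Dict.nodup_keys_foldl_modify_key good Prod.fst [] (fun _ p => (· ++ [p.2])) _ PySem.Dict.nodup_keys_empty
  rw [PySem.Dict.items_eq_map_keys _ hnd []]
  rw [PySem.Dict.keys_foldl_modify_key (key := Prod.fst)]
  simp only [PySem.Set.update_nil_left, PySem.Dict.keys_empty, PySem.List.dedup_eq_ofList]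
  apply List.map_congr_left
  intro h hm
  rw [PySem.Dict.getD_foldl_modify_append]
  simp

-- the grouped items have pairwise-distinct hosts
theorem pv_nodup_fst (good : List (String × String)) :
    (((good.foldl (fun (d : PySem.Dict String (List String)) p => d.modify p.1 [] (· ++ [p.2])) PySem.Dict.empty).items).map (·.1)).Nodup := by
  rw [pv_items_group]
  simp [Function.comp_def]

-- a fold inserting the rows of a Nodup-keyed association list reads back as a map over it
theorem pv_cli_items (L : List (String × List String)) (hnd : (L.map (·.1)).Nodup) (v : String × List String → List String) :
    ((L.foldl (fun (cm : PySem.Dict String (List String)) hi => cm.insert hi.1 (v hi)) PySem.Dict.empty).items)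
      = L.map (fun hi => (hi.1, v hi)) := by
  rw [PySem.Dict.items_foldl_insert_fresh L (·.1) v PySem.Dict.empty (fun a _ => PySem.Dict.contains_empty _) hnd]
  simp [PySem.Dict.empty]

-- A's three-append render loop, as a flatMap of blocks
theorem pv_render1 (L : List String) (desc : String) :
    (L.foldl (fun lines i => lines ++ ["interface " ++ i] ++ ["description " ++ desc] ++ ["exit"]) [])
      = L.flatMap (fun i => ["interface " ++ i] ++ ["description " ++ desc] ++ ["exit"]) := by
  have h : (fun (lines : List String) i => lines ++ ["interface " ++ i] ++ ["description " ++ desc] ++ ["exit"])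
      = fun lines i => lines ++ (["interface " ++ i] ++ ["description " ++ desc] ++ ["exit"]) := by
    funext lines i; simp
  rw [h, PySem.List.foldl_append_eq_flatMap]
  simp

-- A's interface/replaced-config/exit render loop, as a flatMap of blocks
theorem pv_render2 (L cfg : List String) :
    (L.foldl (fun lines i =>
        (cfg.foldl (fun l ln => l ++ [PySem.Str.replace ln "{INTERFACE}" i]) (lines ++ ["interface " ++ i])) ++ ["exit"]) [])
      = L.flatMap (fun i => ["interface " ++ i] ++ cfg.map (fun ln => PySem.Str.replace ln "{INTERFACE}" i) ++ ["exit"]) := by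
  have h : (fun (lines : List String) i =>
        (cfg.foldl (fun l ln => l ++ [PySem.Str.replace ln "{INTERFACE}" i]) (lines ++ ["interface " ++ i])) ++ ["exit"])
      = fun lines i => lines ++ (["interface " ++ i] ++ cfg.map (fun ln => PySem.Str.replace ln "{INTERFACE}" i) ++ ["exit"]) := by
    funext lines i
    rw [PySem.List.foldl_append_singleton_eq_map]
    simp
  rw [h, PySem.List.foldl_append_eq_flatMap]
  simp

-- A's split-strip-keep loop equals B's map-then-filter
theorem pv_cfg_eq (t : String) :
    pvSplitNonemptyLines t
      = ((PySem.Str.splitlines t).map PySem.Str.strip).filter (fun s => decide (s ≠ "")) := by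
  unfold pvSplitNonemptyLines
  rw [PySem.List.foldl_append_ite (p := fun raw => PySem.Str.strip raw ≠ "") (f := PySem.Str.strip)]
  rw [List.filter_map]
  simp [Function.comp_def]

-- A's truthiness test for `new_description and new_description.strip()`
theorem pv_ok_eq (nd : Option String) :
    (match nd with
      | none => false
      | some s => decide (s ≠ "") && decide (PySem.Str.strip s ≠ ""))
      = decide (PySem.Str.strip (nd.getD "") ≠ "") := by
  cases nd with
  | none => decide
  | some s =>
    simp only [Option.getD_some]
    by_cases hs : s = ""
    · subst hs; decide
    · simp [hs]

-- ===== VERDICT (by name: the statement is the Claim_ definition above) =====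
theorem build_cli_for_action_spec : Claim_equal_build_cli_for_action := by
  intro pairs action nd cc _
  unfold Spec_build_cli_for_action
  simp only [build_cli_for_action, build_cli_for_action_alt]
  rw [PySem.List.foldl_ite_eq_foldl_filter (p := fun x : String × String => x.1 ≠ "" ∧ x.2 ≠ "")
      (f := fun (d : PySem.Dict String (List String)) x => d.modify x.1 [] (· ++ [x.2]))]
  by_cases ha : action = "set-description"
  · simp only [ha, if_pos]
    rw [pv_ok_eq]
    by_cases hd : PySem.Str.strip (nd.getD "") = ""
    · simp [hd, pv_keys_group]
    · rw [if_neg (by simp [hd]), if_pos hd]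
      rw [pv_cli_items _ (pv_nodup_fst _)]
      rw [pv_items_group]
      rw [List.map_map]
      apply List.map_congr_left
      intro h _
      simp only [Function.comp_apply]
      rw [pv_render1]
  · by_cases hc : action = "custom-config"
    · rw [if_neg ha, if_pos hc, if_neg ha, if_pos hc]
      rw [pv_cfg_eq]
      by_cases he : ((PySem.Str.splitlines (cc.getD "")).map PySem.Str.strip).filter (fun s => decide (s ≠ "")) = []
      · rw [if_pos he, if_neg (not_not_intro he), pv_keys_group]
      · rw [if_neg he, if_pos he]
        rw [pv_cli_items _ (pv_nodup_fst _)]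
        rw [pv_items_group]
        rw [List.map_map]
        apply List.map_congr_left
        intro h _
        simp only [Function.comp_apply]
        rw [pv_render2]
    · rw [if_neg ha, if_neg hc, if_neg ha, if_neg hc]
      rw [pv_keys_group]
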